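-- pv_equiv track=rewrite | github.com/zhutianning/Programming-for-Language-Technologists | assignment_2/ans2.py | divisible_13
-- ===== SOURCE A (Python) =====
-- def divisible_13(number):
--     their_sum = 0
--     i_count = 0
--     for i in range(1,int(number)+1):
--         if i % 13 == 0:
--             i_count += 1
--             their_sum += i
--     return (i_count,their_sum)
-- ===== SOURCE B (Python) =====
-- def divisible_13(number):
--     # Closed form: k multiples of 13 in [1, n]; their sum is the 13-scaled triangular number.
--     k = max(0, int(number) // 13)
--     return (k, 13 * k * (k + 1) // 2)
-- ===== Notes on version B (the rewrite author's own statement) =====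
-- stated objective: faster
-- what changed: Replaces the O(n) loop over range(1, n+1) with the closed form k = n//13 and sum = 13*k*(k+1)//2.
import Mathlib
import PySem

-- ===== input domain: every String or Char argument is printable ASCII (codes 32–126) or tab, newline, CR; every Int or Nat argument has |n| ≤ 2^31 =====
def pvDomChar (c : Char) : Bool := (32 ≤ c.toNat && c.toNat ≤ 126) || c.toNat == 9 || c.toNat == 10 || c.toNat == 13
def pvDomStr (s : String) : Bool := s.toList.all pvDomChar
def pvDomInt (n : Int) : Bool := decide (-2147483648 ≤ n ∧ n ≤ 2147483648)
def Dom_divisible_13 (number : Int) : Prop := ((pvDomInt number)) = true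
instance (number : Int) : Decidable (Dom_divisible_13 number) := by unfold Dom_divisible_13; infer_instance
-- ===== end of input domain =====

-- B replaces A's O(n) loop by the closed form k = n//13, sum = 13*k*(k+1)//2 (objective: faster).

-- ===== PORT A =====
-- state = (their_sum, i_count), exactly the two accumulators of A's loop
def divisible_13 (number : Int) : List Int :=
  let st := (PySem.List.pyRange 1 (number + 1) 1).foldl
    (fun (st : Int × Int) i =>
      if PySem.Int.mod i 13 = 0 then (st.1 + i, st.2 + 1) else st) (0, 0)
  [st.2, st.1]

-- ===== PORT B =====
def divisible_13_alt (number : Int) : List Int :=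
  let k := max 0 (PySem.Int.floordiv number 13)
  [k, PySem.Int.floordiv (13 * k * (k + 1)) 2]

-- ===== PRECONDITION & SPEC =====
def Spec_divisible_13 (number : Int) (out : List Int) : Prop := out = divisible_13_alt number
instance (number : Int) (out : List Int) : Decidable (Spec_divisible_13 number out) := by unfold Spec_divisible_13; infer_instance

-- ===== CLAIM (what is proved, stated in full; the proofs are below) =====
def Claim_equal_divisible_13 : Prop := ∀ (number : Int), Dom_divisible_13 number → Spec_divisible_13 number (divisible_13 number)

-- ===== LEMMAS AND PROOFS =====

-- the loop body of A's port, named for the lemmas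
def pvBody : Int × Int → Int → Int × Int :=
  fun st i => if PySem.Int.mod i 13 = 0 then (st.1 + i, st.2 + 1) else st

lemma pvTri_succ (c : Nat) : (c + 1) * (c + 2) / 2 = c * (c + 1) / 2 + (c + 1) := by
  have h1 : Even (c * (c + 1)) := Nat.even_mul_succ_self c
  have h2 : (c + 1) * (c + 2) = c * (c + 1) + 2 * (c + 1) := by ring
  obtain ⟨m, hm⟩ := h1
  omega

lemma pvLoop_eq (n : Nat) :
    (PySem.List.pyRange 1 ((n : Int) + 1) 1).foldl pvBody (0, 0) =
      (((13 * (n / 13 * (n / 13 + 1) / 2) : Nat) : Int), ((n / 13 : Nat) : Int)) := by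
  induction n with
  | zero => simp
  | succ n ih =>
    have hsplit : PySem.List.pyRange 1 ((n : Int) + 1 + 1) 1 =
        PySem.List.pyRange 1 ((n : Int) + 1) 1 ++ [(n : Int) + 1] := by
      exact PySem.List.pyRange_one_succ_right (by omega)
    have hstep : PySem.List.pyRange 1 (((n + 1 : Nat) : Int) + 1) 1 =
        PySem.List.pyRange 1 ((n : Int) + 1) 1 ++ [(n : Int) + 1] := by
      push_cast; push_cast at hsplit; exact hsplit
    rw [hstep, List.foldl_append, ih]
    have hmod : PySem.Int.mod ((n : Int) + 1) 13 = (((n + 1) % 13 : Nat) : Int) := by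
      rw [PySem.Int.mod_eq_emod_of_pos (by omega)]
      push_cast
      omega
    by_cases h : (n + 1) % 13 = 0
    · have hc : (n + 1) / 13 = n / 13 + 1 := by omega
      have hval : n + 1 = 13 * (n / 13 + 1) := by omega
      have htri := pvTri_succ (n / 13)
      simp only [List.foldl_cons, List.foldl_nil, pvBody, hmod, h, Nat.cast_zero]
      refine Prod.ext ?_ ?_ <;> simp only []
      · have key : 13 * ((n + 1) / 13 * ((n + 1) / 13 + 1) / 2) =
            13 * (n / 13 * (n / 13 + 1) / 2) + (n + 1) := by
          rw [hc, show n / 13 + 1 + 1 = n / 13 + 2 from by omega, htri,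
            Nat.mul_add, ← hval]
        rw [key]
        push_cast
        ring
      · rw [hc]; push_cast; ring
    · have hc : (n + 1) / 13 = n / 13 := by omega
      simp only [List.foldl_cons, List.foldl_nil, pvBody, hmod]
      rw [if_neg (by exact_mod_cast h), hc]

-- ===== VERDICT (by name: the statement is the Claim_ definition above) =====
theorem divisible_13_spec : Claim_equal_divisible_13 := by
  intro number _
  unfold Spec_divisible_13 divisible_13 divisible_13_alt
  by_cases hneg : number ≤ 0
  · have hnil : PySem.List.pyRange 1 (number + 1) 1 = [] :=
      PySem.List.pyRange_one_eq_nil (by omega)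
    have hk : max 0 (PySem.Int.floordiv number 13) = 0 := by
      have : PySem.Int.floordiv number 13 ≤ 0 := by
        rw [PySem.Int.floordiv_eq_ediv_of_pos (by omega : (0:Int) < 13)]
        omega
      omega
    simp only [hnil, List.foldl_nil, hk]
    decide
  · replace hneg : 0 < number := by omega
    obtain ⟨n, rfl⟩ : ∃ m : Nat, number = (m : Int) := ⟨number.toNat, by omega⟩
    have hloop := pvLoop_eq n
    show [((PySem.List.pyRange 1 ((n:Int) + 1) 1).foldl pvBody (0, 0)).2,
          ((PySem.List.pyRange 1 ((n:Int) + 1) 1).foldl pvBody (0, 0)).1] = _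
    rw [hloop]
    have hk : max 0 (PySem.Int.floordiv (n : Int) 13) = ((n / 13 : Nat) : Int) := by
      rw [show ((13 : Int)) = ((13 : Nat) : Int) by norm_num, PySem.Int.floordiv_natCast]
      omega
    have hsum : PySem.Int.floordiv (13 * ((n / 13 : Nat) : Int) * (((n / 13 : Nat) : Int) + 1)) 2 =
        ((13 * (n / 13 * (n / 13 + 1) / 2) : Nat) : Int) := by
      have he : Even (n / 13 * (n / 13 + 1)) := Nat.even_mul_succ_self _
      obtain ⟨m, hm⟩ := he
      have h1 : 13 * ((n / 13 : Nat) : Int) * (((n / 13 : Nat) : Int) + 1) = 2 * (13 * m) := by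
        push_cast
        nlinarith [hm]
      have h2 : (13 * (n / 13 * (n / 13 + 1) / 2) : Nat) = 13 * m := by omega
      rw [h1, h2, PySem.Int.floordiv_eq_ediv_of_pos (by omega : (0:Int) < 2)]
      push_cast
      omega
    simp only [hk, hsum]
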